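-- pv_equiv track=rewrite | github.com/biobenkj/tranquillyzer | scripts/barcode_correction.py | correct_barcode
-- ===== SOURCE A (Python) =====
-- def levenshtein_distance(s1, s2):
--     """Calculate the Levenshtein distance between two strings."""
--     if len(s1) < len(s2):
--         return levenshtein_distance(s2, s1)
--
--     # Initialize the distance matrix
--     previous_row = range(len(s2) + 1)
--
--     for i, c1 in enumerate(s1):
--         current_row = [i + 1]
--         for j, c2 in enumerate(s2):
--             insertions = previous_row[j + 1] + 1
--             deletions = current_row[j] + 1
--             substitutions = previous_row[j] + (c1 != c2)
--             current_row.append(min(insertions, deletions, substitutions))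
--         previous_row = current_row
--
--     return previous_row[-1]
--
-- def correct_barcode(barcode, whitelist):
--     """Correct the given barcode using the whitelist and determine closest matches."""
--     min_distance = float('inf')
--     closest_barcodes = []
--
--     for valid_barcode in whitelist:
--         distance = levenshtein_distance(barcode, valid_barcode)
--         if distance < min_distance:
--             min_distance = distance
--             closest_barcodes = [valid_barcode]
--         elif distance == min_distance:
--             closest_barcodes.append(valid_barcode)
--
--     if not closest_barcodes:
--         return None, None, 'No match found'
--
--     match_status = 'Single match' if len(closest_barcodes) == 1 else 'Multiple matches'
--     return closest_barcodes, min_distance, match_status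
-- ===== SOURCE B (Python) =====
-- def levenshtein_distance(s1, s2):
--     """Levenshtein distance via top-down memoized recursion on prefix lengths."""
--     memo = {}
--     def d(i, j):
--         if i == 0:
--             return j
--         if j == 0:
--             return i
--         if (i, j) in memo:
--             return memo[(i, j)]
--         cost = 0 if s1[i - 1] == s2[j - 1] else 1
--         r = min(d(i - 1, j) + 1, d(i, j - 1) + 1, d(i - 1, j - 1) + cost)
--         memo[(i, j)] = r
--         return r
--     return d(len(s1), len(s2))
--
-- def correct_barcode(barcode, whitelist):
--     """Correct the given barcode using the whitelist and determine closest matches."""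
--     dists = [levenshtein_distance(barcode, v) for v in whitelist]
--     if not dists:
--         return None, None, 'No match found'
--     min_distance = min(dists)
--     closest_barcodes = [v for v, d in zip(whitelist, dists) if d == min_distance]
--     match_status = 'Single match' if len(closest_barcodes) == 1 else 'Multiple matches'
--     return closest_barcodes, min_distance, match_status
-- ===== Notes on version B (the rewrite author's own statement) =====
-- stated objective: alternative
-- what changed: levenshtein_distance is recomputed top-down by memoized recursion on prefix lengths (no argument swap, a dict of (i,j) subproblems) instead of A's bottom-up two-row iterative DP, and correct_barcode is decomposed declaratively (distance table, min, filter for ties) instead of A's running-min accumulator loop.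
import Mathlib
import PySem

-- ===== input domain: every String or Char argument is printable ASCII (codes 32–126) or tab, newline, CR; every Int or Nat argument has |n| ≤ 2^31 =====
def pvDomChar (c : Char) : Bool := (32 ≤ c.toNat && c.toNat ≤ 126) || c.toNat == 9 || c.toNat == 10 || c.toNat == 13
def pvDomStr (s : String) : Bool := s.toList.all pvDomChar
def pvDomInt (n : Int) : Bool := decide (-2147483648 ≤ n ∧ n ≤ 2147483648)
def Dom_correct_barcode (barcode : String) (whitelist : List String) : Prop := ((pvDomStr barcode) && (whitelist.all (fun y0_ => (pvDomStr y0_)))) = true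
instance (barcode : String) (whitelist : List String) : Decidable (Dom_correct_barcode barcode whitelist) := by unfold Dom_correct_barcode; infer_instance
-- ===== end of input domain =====

-- B replaces A's bottom-up two-row Levenshtein DP (with argument swap) by top-down memoized
-- recursion on prefix lengths, and A's running-min scan by a distance table + min + filter.
-- Objective: alternative (same asymptotic cost).

-- ===== PORT A =====
-- inner loop body of A's levenshtein_distance (prev = previous_row, c1 fixed by the outer loop)
def levInner (prev : List Int) (c1 : Char) (cur : List Int) (jc : Int × Char) : List Int :=
  let j := jc.1
  let c2 := jc.2
  let insertions := PySem.List.pyGetD prev (j + 1) 0 + 1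
  let deletions := PySem.List.pyGetD cur j 0 + 1
  let substitutions := PySem.List.pyGetD prev j 0 + (if c1 ≠ c2 then 1 else 0)
  cur ++ [min insertions (min deletions substitutions)]

-- outer loop body: build current_row from previous_row
def levRow (l2 : List Char) (prev : List Int) (ic : Int × Char) : List Int :=
  (PySem.List.enumerate l2).foldl (levInner prev ic.2) [ic.1 + 1]

def lev_core (s1 s2 : String) : Int :=
  let l1 := s1.toList
  let l2 := s2.toList
  PySem.List.pyGetD
    ((PySem.List.enumerate l1).foldl (levRow l2) ((List.range (l2.length + 1)).map Int.ofNat))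
    (-1) 0

def levenshtein_distance (s1 s2 : String) : Int :=
  if s1.length < s2.length then lev_core s2 s1 else lev_core s1 s2

-- the body of A's for-loop (state: (closest_barcodes, min_distance), none = float('inf'))
def correct_barcode_step (barcode : String) (st : List String × Option Int) (valid_barcode : String) : List String × Option Int :=
  let distance := levenshtein_distance barcode valid_barcode
  match st.2 with
  | none => ([valid_barcode], some distance)     -- distance < float('inf')
  | some m =>
    if distance < m then ([valid_barcode], some distance)
    else if distance = m then (st.1 ++ [valid_barcode], some m)
    else st

def correct_barcode (barcode : String) (whitelist : List String) : Option (List String) × Option Int × String :=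
  let st := whitelist.foldl (correct_barcode_step barcode) ([], none)
  let closest := st.1
  if closest = [] then (none, none, "No match found")
  else (some closest, st.2, if closest.length = 1 then "Single match" else "Multiple matches")

-- ===== PORT B =====
-- Source B's inner d(i, j): top-down recursion on prefix lengths, threading the memo dict
-- (fuel = a structural-recursion bound, i + j suffices; never exhausted on the call below)
def levmD (l1 l2 : List Char) (fuel : Nat) (i j : Nat) (memo : PySem.Dict (Nat × Nat) Int) : Int × PySem.Dict (Nat × Nat) Int :=
  if i = 0 then ((j : Int), memo)
  else if j = 0 then ((i : Int), memo)
  else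
    match fuel with
    | 0 => ((0 : Int), memo)
    | fuel + 1 =>
      match memo.get? (i, j) with
      | some v => (v, memo)
      | none =>
        let cost : Int := if l1.getD (i - 1) ' ' = l2.getD (j - 1) ' ' then 0 else 1
        let p1 := levmD l1 l2 fuel (i - 1) j memo
        let p2 := levmD l1 l2 fuel i (j - 1) p1.2
        let p3 := levmD l1 l2 fuel (i - 1) (j - 1) p2.2
        let r := min (p1.1 + 1) (min (p2.1 + 1) (p3.1 + cost))
        (r, p3.2.insert (i, j) r)

def levenshtein_distance_alt (s1 s2 : String) : Int :=
  (levmD s1.toList s2.toList (s1.toList.length + s2.toList.length) s1.toList.length s2.toList.length PySem.Dict.empty).1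

def correct_barcode_alt (barcode : String) (whitelist : List String) : Option (List String) × Option Int × String :=
  let dists := whitelist.map (fun v => levenshtein_distance_alt barcode v)
  match PySem.List.min? dists (fun x => x) with
  | none => (none, none, "No match found")
  | some m =>
    let closest := ((whitelist.zip dists).filter (fun p => decide (p.2 = m))).map Prod.fst
    (some closest, some m, if closest.length = 1 then "Single match" else "Multiple matches")

-- ===== PRECONDITION & SPEC =====
def Spec_correct_barcode (barcode : String) (whitelist : List String) (out : Option (List String) × Option Int × String) : Prop := out = correct_barcode_alt barcode whitelist
instance (barcode : String) (whitelist : List String) (out : Option (List String) × Option Int × String) : Decidable (Spec_correct_barcode barcode whitelist out) := by unfold Spec_correct_barcode; infer_instance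

-- ===== CLAIM =====
def Claim_equal_correct_barcode : Prop := ∀ (barcode : String) (whitelist : List String), Dom_correct_barcode barcode whitelist → Spec_correct_barcode barcode whitelist (correct_barcode barcode whitelist)

-- ===== LEMMAS AND PROOFS =====

-- the shared mathematical recurrence: Levenshtein distance of the length-i and length-j prefixes
def levP (l1 l2 : List Char) (i j : Nat) : Int :=
  if _hi : i = 0 then (j : Int)
  else if _hj : j = 0 then (i : Int)
  else
    min (levP l1 l2 (i - 1) j + 1)
      (min (levP l1 l2 i (j - 1) + 1)
        (levP l1 l2 (i - 1) (j - 1) + if l1.getD (i - 1) ' ' ≠ l2.getD (j - 1) ' ' then 1 else 0))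
termination_by i + j
decreasing_by all_goals omega

theorem levP_zero_left (l1 l2 : List Char) (j : Nat) : levP l1 l2 0 j = (j : Int) := by
  rw [levP]; simp

theorem levP_zero_right (l1 l2 : List Char) (i : Nat) : levP l1 l2 i 0 = (i : Int) := by
  rw [levP]; by_cases hi : i = 0 <;> simp [hi]

theorem levP_succ (l1 l2 : List Char) (i j : Nat) :
    levP l1 l2 (i + 1) (j + 1)
      = min (levP l1 l2 i (j + 1) + 1)
          (min (levP l1 l2 (i + 1) j + 1)
            (levP l1 l2 i j + if l1.getD i ' ' ≠ l2.getD j ' ' then 1 else 0)) := by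
  rw [levP]; simp

-- symmetry of the recurrence (justifies A's argument swap)
theorem levP_symm (l1 l2 : List Char) : ∀ (n i j : Nat), i + j ≤ n → levP l1 l2 i j = levP l2 l1 j i := by
  intro n
  induction n with
  | zero =>
    intro i j h
    have hi : i = 0 := by omega
    have hj : j = 0 := by omega
    subst hi; subst hj; rw [levP_zero_left, levP_zero_left]
  | succ n ih =>
    intro i j h
    by_cases hi : i = 0
    · subst hi; rw [levP_zero_left, levP_zero_right]
    · by_cases hj : j = 0
      · subst hj; rw [levP_zero_left, levP_zero_right]
      · obtain ⟨i', rfl⟩ : ∃ i', i = i' + 1 := ⟨i - 1, by omega⟩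
        obtain ⟨j', rfl⟩ : ∃ j', j = j' + 1 := ⟨j - 1, by omega⟩
        rw [levP_succ, levP_succ]
        rw [ih i' (j' + 1) (by omega), ih (i' + 1) j' (by omega), ih i' j' (by omega)]
        rcases eq_or_ne (l1.getD i' ' ') (l2.getD j' ' ') with hc | hc
        · rw [if_neg (not_not_intro hc), if_neg (not_not_intro hc.symm)]
          omega
        · rw [if_pos hc, if_pos (Ne.symm hc)]
          omega

-- every memo entry is the value of the recurrence
def GoodMemo (l1 l2 : List Char) (m : PySem.Dict (Nat × Nat) Int) : Prop :=
  ∀ (p : Nat × Nat) (v : Int), m.get? p = some v → v = levP l1 l2 p.1 p.2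

theorem levmD_levP (l1 l2 : List Char) : ∀ (fuel i j : Nat) (m : PySem.Dict (Nat × Nat) Int),
    i + j ≤ fuel → GoodMemo l1 l2 m →
    (levmD l1 l2 fuel i j m).1 = levP l1 l2 i j ∧ GoodMemo l1 l2 (levmD l1 l2 fuel i j m).2 := by
  intro fuel
  induction fuel with
  | zero =>
    intro i j m h hg
    have hi : i = 0 := by omega
    subst hi
    rw [levmD, if_pos rfl, levP_zero_left]
    exact ⟨rfl, hg⟩
  | succ n ih =>
    intro i j m h hg
    by_cases hi : i = 0
    · subst hi
      rw [levmD, if_pos rfl, levP_zero_left]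
      exact ⟨rfl, hg⟩
    · by_cases hj : j = 0
      · subst hj
        rw [levmD, if_neg hi, if_pos rfl, levP_zero_right]
        exact ⟨rfl, hg⟩
      · rw [levmD, if_neg hi, if_neg hj]
        rcases hmem : m.get? (i, j) with _ | v
        · simp only [hmem]
          obtain ⟨h1v, h1g⟩ := ih (i - 1) j m (by omega) hg
          obtain ⟨h2v, h2g⟩ := ih i (j - 1) _ (by omega) h1g
          obtain ⟨h3v, h3g⟩ := ih (i - 1) (j - 1) _ (by omega) h2g
          have hval :
              min ((levmD l1 l2 n (i - 1) j m).1 + 1)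
                (min ((levmD l1 l2 n i (j - 1) (levmD l1 l2 n (i - 1) j m).2).1 + 1)
                  ((levmD l1 l2 n (i - 1) (j - 1) (levmD l1 l2 n i (j - 1) (levmD l1 l2 n (i - 1) j m).2).2).1
                    + if l1.getD (i - 1) ' ' = l2.getD (j - 1) ' ' then 0 else 1))
              = levP l1 l2 i j := by
            rw [h1v, h2v, h3v]
            conv_rhs => rw [levP]
            rw [dif_neg hi, dif_neg hj]
            by_cases hc : l1.getD (i - 1) ' ' = l2.getD (j - 1) ' ' <;> simp [hc]
          refine ⟨hval, ?_⟩
          intro p v hpv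
          by_cases hp : p = (i, j)
          · subst hp
            rw [PySem.Dict.get?_insert_self] at hpv
            injection hpv with hv
            rw [← hv]
            exact hval
          · rw [PySem.Dict.get?_insert_of_ne _ _ hp] at hpv
            exact h3g p v hpv
        · simp only [hmem]
          exact ⟨hg (i, j) v hmem, hg⟩

-- ===== the DP side: A's two-row table computes the same recurrence =====

theorem row_zero (l2 l1 : List Char) :
    (List.range (l2.length + 1)).map Int.ofNat
      = (List.range (l2.length + 1)).map (fun j => levP l1 l2 0 j) := by
  refine List.map_congr_left ?_
  intro j _
  rw [levP_zero_left]
  rfl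

theorem getD_row (f : Nat → Int) (n k : Nat) (hk : k < n) :
    ((List.range n).map f).getD k 0 = f k := by
  rw [List.getD_eq_getElem?_getD, List.getElem?_map, List.getElem?_range hk]
  rfl

theorem inner_inv (l1 l2 : List Char) (i : Nat) :
    ∀ (t : List Char) (s : Nat), l2.drop s = t → s ≤ l2.length →
      (PySem.List.enumerate t (s : Int)).foldl
          (levInner ((List.range (l2.length + 1)).map (fun j => levP l1 l2 i j)) (l1.getD i ' '))
          ((List.range (s + 1)).map (fun j => levP l1 l2 (i + 1) j))
      = (List.range (l2.length + 1)).map (fun j => levP l1 l2 (i + 1) j) := by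
  intro t
  induction t with
  | nil =>
    intro s hdrop hs
    have : s = l2.length := by
      have := congrArg List.length hdrop
      simp [List.length_drop] at this
      omega
    subst this
    simp [PySem.List.enumerate]
  | cons c rest ih =>
    intro s hdrop hs
    have hslt : s < l2.length := by
      have := congrArg List.length hdrop
      simp [List.length_drop] at this
      omega
    have hc : l2.getD s ' ' = c := by
      have h0 : (l2.drop s).getD 0 ' ' = c := by rw [hdrop]; rfl
      rwa [List.getD_eq_getElem?_getD, List.getElem?_drop, Nat.add_zero,
        ← List.getD_eq_getElem?_getD] at h0
    have hdrop' : l2.drop (s + 1) = rest := by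
      have : l2.drop (s + 1) = (l2.drop s).drop 1 := by
        rw [List.drop_drop]
      rw [this, hdrop]
      rfl
    rw [PySem.List.enumerate_cons, List.foldl_cons]
    have hstep :
        levInner ((List.range (l2.length + 1)).map (fun j => levP l1 l2 i j)) (l1.getD i ' ')
            ((List.range (s + 1)).map (fun j => levP l1 l2 (i + 1) j)) ((s : Int), c)
          = (List.range (s + 1 + 1)).map (fun j => levP l1 l2 (i + 1) j) := by
      unfold levInner
      simp only []
      have e1 : ((s : Int)) + 1 = ((s + 1 : Nat) : Int) := by push_cast; ring
      rw [e1, PySem.List.pyGetD_natCast, PySem.List.pyGetD_natCast, PySem.List.pyGetD_natCast]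
      rw [getD_row _ _ _ (by omega), getD_row _ _ _ (by omega), getD_row _ _ _ (by omega)]
      rw [List.range_succ (n := s + 1), List.map_append]
      congr 1
      simp only [List.map_cons, List.map_nil]
      congr 1
      rw [levP_succ, hc]
    rw [hstep]
    exact ih (s + 1) hdrop' (by omega)

theorem outer_inv (l1 l2 : List Char) :
    ∀ (t : List Char) (s : Nat), l1.drop s = t → s ≤ l1.length →
      (PySem.List.enumerate t (s : Int)).foldl (levRow l2)
          ((List.range (l2.length + 1)).map (fun j => levP l1 l2 s j))
      = (List.range (l2.length + 1)).map (fun j => levP l1 l2 l1.length j) := by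
  intro t
  induction t with
  | nil =>
    intro s hdrop hs
    have : s = l1.length := by
      have := congrArg List.length hdrop
      simp [List.length_drop] at this
      omega
    subst this
    simp [PySem.List.enumerate]
  | cons c rest ih =>
    intro s hdrop hs
    have hslt : s < l1.length := by
      have := congrArg List.length hdrop
      simp [List.length_drop] at this
      omega
    have hc : l1.getD s ' ' = c := by
      have h0 : (l1.drop s).getD 0 ' ' = c := by rw [hdrop]; rfl
      rwa [List.getD_eq_getElem?_getD, List.getElem?_drop, Nat.add_zero,
        ← List.getD_eq_getElem?_getD] at h0
    have hdrop' : l1.drop (s + 1) = rest := by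
      have : l1.drop (s + 1) = (l1.drop s).drop 1 := by rw [List.drop_drop]
      rw [this, hdrop]
      rfl
    rw [PySem.List.enumerate_cons, List.foldl_cons]
    have hstep :
        levRow l2 ((List.range (l2.length + 1)).map (fun j => levP l1 l2 s j)) ((s : Int), c)
          = (List.range (l2.length + 1)).map (fun j => levP l1 l2 (s + 1) j) := by
      unfold levRow
      have hinit : [((s : Int)) + 1] = (List.range (0 + 1)).map (fun j => levP l1 l2 (s + 1) j) := by
        simp only [Nat.zero_add, List.range_one, List.map_cons, List.map_nil, levP_zero_right]
        congr 1
      rw [hinit]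
      have h0 : ((0 : Nat) : Int) = (0 : Int) := by norm_num
      have := inner_inv l1 l2 s l2 0 rfl (by omega)
      rw [h0] at this
      rw [← hc]
      exact this
    rw [hstep]
    exact ih (s + 1) hdrop' (by omega)

theorem lev_core_levP (s1 s2 : String) :
    lev_core s1 s2 = levP s1.toList s2.toList s1.toList.length s2.toList.length := by
  unfold lev_core
  simp only []
  rw [row_zero s2.toList s1.toList]
  have h0 : ((0 : Nat) : Int) = (0 : Int) := by norm_num
  have houter := outer_inv s1.toList s2.toList s1.toList 0 rfl (by omega)
  rw [h0] at houter
  rw [houter]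
  rw [List.range_succ, List.map_append]
  simp only [List.map_cons, List.map_nil]
  rw [PySem.List.pyGetD_neg_one_append_singleton]

theorem lev_eq (s1 s2 : String) : levenshtein_distance_alt s1 s2 = levenshtein_distance s1 s2 := by
  unfold levenshtein_distance_alt levenshtein_distance
  have hempty : GoodMemo s1.toList s2.toList PySem.Dict.empty := by
    intro p v hpv
    simp [PySem.Dict.get?, PySem.Dict.empty] at hpv
  rw [(levmD_levP s1.toList s2.toList (s1.toList.length + s2.toList.length)
        s1.toList.length s2.toList.length PySem.Dict.empty le_rfl hempty).1]
  by_cases h : s1.length < s2.length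
  · rw [if_pos h, lev_core_levP, levP_symm s2.toList s1.toList (s2.toList.length + s1.toList.length) _ _ le_rfl]
  · rw [if_neg h, lev_core_levP]

-- ===== the selection side =====

-- filtering the zipped table by distance = filtering the whitelist by its distance
theorem filter_zip_map (f : String → Int) (m : Int) (ws : List String) :
    ((ws.zip (ws.map f)).filter (fun p => decide (p.2 = m))).map Prod.fst
      = ws.filter (fun v => decide (f v = m)) := by
  induction ws with
  | nil => rfl
  | cons v t ih =>
    simp only [List.map_cons, List.zip_cons_cons, List.filter_cons]
    by_cases h : f v = m <;> simp [h, ih]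

-- foldl min pulls a fixed element out front
theorem foldl_min_comm : ∀ (l : List Int) (d a : Int), l.foldl min (min d a) = min d (l.foldl min a) := by
  intro l
  induction l with
  | nil => intro d a; rfl
  | cons b rest ih =>
    intro d a
    simp only [List.foldl_cons, min_assoc]
    exact ih d (min a b)

-- structural form of Python's min() on a cons
theorem min?_cons (d : Int) (l : List Int) :
    PySem.List.min? (d :: l) (fun x => x)
      = some (match PySem.List.min? l (fun x => x) with | none => d | some M => min d M) := by
  cases l with
  | nil => simp [PySem.List.min?]
  | cons a rest =>
    simp only [PySem.List.min?_id_cons, List.foldl_cons]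
    rw [foldl_min_comm]

theorem min?_cons_none (d : Int) (l : List Int) (h : PySem.List.min? l (fun x => x) = none) :
    PySem.List.min? (d :: l) (fun x => x) = some d := by
  rw [min?_cons, h]

theorem min?_cons_some (d M : Int) (l : List Int) (h : PySem.List.min? l (fun x => x) = some M) :
    PySem.List.min? (d :: l) (fun x => x) = some (min d M) := by
  rw [min?_cons, h]

theorem step_some (barcode : String) (c : List String) (m0 : Int) (v : String) :
    correct_barcode_step barcode (c, some m0) v
      = (if levenshtein_distance barcode v < m0 then ([v], some (levenshtein_distance barcode v))
         else if levenshtein_distance barcode v = m0 then (c ++ [v], some m0)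
         else (c, some m0)) := rfl

-- characterisation of A's running-min loop from an already-seen state (c, some m0)
theorem loop_char (barcode : String) : ∀ (ws : List String) (c : List String) (m0 : Int),
    ws.foldl (correct_barcode_step barcode) (c, some m0)
    = match PySem.List.min? (ws.map (fun v => levenshtein_distance barcode v)) (fun x => x) with
      | none => (c, some m0)
      | some M =>
        if M < m0 then (ws.filter (fun v => decide (levenshtein_distance barcode v = M)), some M)
        else if M = m0 then (c ++ ws.filter (fun v => decide (levenshtein_distance barcode v = m0)), some m0)
        else (c, some m0) := by
  intro ws
  induction ws with
  | nil => intro c m0; simp [PySem.List.min?]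
  | cons v t ih =>
    intro c m0
    rw [List.foldl_cons, step_some, List.map_cons]
    rcases hMt : PySem.List.min? (t.map (fun v => levenshtein_distance barcode v)) (fun x => x) with _ | Mt
    · -- tail min is empty ⇒ t = []
      have ht' : t = [] := by
        have := (PySem.List.min?_eq_none_iff (t.map (fun v => levenshtein_distance barcode v)) (fun x => x)).1 hMt
        simpa using this
      subst ht'
      rw [min?_cons_none _ _ hMt]
      by_cases h1 : levenshtein_distance barcode v < m0
      · simp [h1, List.filter_cons, show ¬ (levenshtein_distance barcode v = m0) by omega]
      · by_cases h2 : levenshtein_distance barcode v = m0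
        · simp [h1, h2, List.filter_cons]
        · simp [h1, h2, List.filter_cons]
    · rw [min?_cons_some _ _ _ hMt]
      have hle : ∀ x ∈ t, Mt ≤ levenshtein_distance barcode x := by
        intro x hx
        exact PySem.List.min?_isMin hMt _ (List.mem_map_of_mem hx)
      by_cases h1 : levenshtein_distance barcode v < m0
      · rw [if_pos h1, ih [v] (levenshtein_distance barcode v), hMt]
        by_cases ha : Mt < levenshtein_distance barcode v
        · simp [ha, show min (levenshtein_distance barcode v) Mt = Mt by omega, List.filter_cons,
            show ¬ (levenshtein_distance barcode v = Mt) by omega, show Mt < m0 by omega]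
        · by_cases hb : Mt = levenshtein_distance barcode v
          · simp [ha, hb, show min (levenshtein_distance barcode v) Mt = levenshtein_distance barcode v by omega,
              List.filter_cons, h1]
          · have hnil : t.filter (fun x => decide (levenshtein_distance barcode x = levenshtein_distance barcode v)) = [] := by
              rw [List.filter_eq_nil_iff]
              intro x hx
              have := hle x hx
              simp only [decide_eq_true_eq]
              omega
            simp [ha, hb, show min (levenshtein_distance barcode v) Mt = levenshtein_distance barcode v by omega,
              List.filter_cons, h1, hnil]
      · by_cases h2 : levenshtein_distance barcode v = m0
        · rw [if_neg h1, if_pos h2, ih (c ++ [v]) m0, hMt]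
          by_cases ha : Mt < m0
          · simp [ha, show min (levenshtein_distance barcode v) Mt = Mt by omega, List.filter_cons,
              show ¬ (levenshtein_distance barcode v = Mt) by omega]
          · by_cases hb : Mt = m0
            · simp [ha, hb, show min (levenshtein_distance barcode v) Mt = m0 by omega, List.filter_cons, h2]
            · have hnil : t.filter (fun x => decide (levenshtein_distance barcode x = m0)) = [] := by
                rw [List.filter_eq_nil_iff]
                intro x hx
                have := hle x hx
                simp only [decide_eq_true_eq]
                omega
              simp [ha, hb, show min (levenshtein_distance barcode v) Mt = m0 by omega, List.filter_cons, h2, hnil]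
        · rw [if_neg h1, if_neg h2, ih c m0, hMt]
          have hgt : m0 < levenshtein_distance barcode v := by omega
          by_cases ha : Mt < m0
          · simp [ha, show min (levenshtein_distance barcode v) Mt = Mt by omega, List.filter_cons,
              show ¬ (levenshtein_distance barcode v = Mt) by omega]
          · by_cases hb : Mt = m0
            · simp [ha, hb, h1, h2, List.filter_cons,
                show min (levenshtein_distance barcode v) m0 = m0 by omega,
                show m0 ≤ levenshtein_distance barcode v by omega]
            · simp [ha, hb, show ¬ (min (levenshtein_distance barcode v) Mt < m0) by omega,
                show ¬ (min (levenshtein_distance barcode v) Mt = m0) by omega]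

-- ===== VERDICT =====
theorem correct_barcode_spec : Claim_equal_correct_barcode := by
  unfold Claim_equal_correct_barcode
  intro barcode whitelist _
  unfold Spec_correct_barcode
  simp only [correct_barcode, correct_barcode_alt, lev_eq, filter_zip_map]
  cases whitelist with
  | nil => simp [PySem.List.min?]
  | cons v t =>
    rw [List.foldl_cons]
    rw [show correct_barcode_step barcode ([], none) v = ([v], some (levenshtein_distance barcode v)) from rfl]
    rw [loop_char barcode t [v] (levenshtein_distance barcode v), List.map_cons]
    rcases hMt : PySem.List.min? (t.map (fun v => levenshtein_distance barcode v)) (fun x => x) with _ | Mt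
    · have ht' : t = [] := by
        have := (PySem.List.min?_eq_none_iff (t.map (fun v => levenshtein_distance barcode v)) (fun x => x)).1 hMt
        simpa using this
      subst ht'
      rw [min?_cons_none _ _ hMt]
      simp [List.filter_cons]
    · rw [min?_cons_some _ _ _ hMt]
      have hle : ∀ x ∈ t, Mt ≤ levenshtein_distance barcode x := by
        intro x hx
        exact PySem.List.min?_isMin hMt _ (List.mem_map_of_mem hx)
      have hmem : ∃ x ∈ t, levenshtein_distance barcode x = Mt := by
        have := PySem.List.min?_mem hMt
        simpa using this
      by_cases ha : Mt < levenshtein_distance barcode v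
      · have hne : t.filter (fun x => decide (levenshtein_distance barcode x = Mt)) ≠ [] := by
          rw [ne_eq, List.filter_eq_nil_iff]
          push_neg
          obtain ⟨x, hx, hfx⟩ := hmem
          exact ⟨x, hx, by simp [hfx]⟩
        simp [ha, show min (levenshtein_distance barcode v) Mt = Mt by omega, List.filter_cons,
          show ¬ (levenshtein_distance barcode v = Mt) by omega, hne]
      · by_cases hb : Mt = levenshtein_distance barcode v
        · simp [ha, hb, show min (levenshtein_distance barcode v) Mt = levenshtein_distance barcode v by omega,
            List.filter_cons]
        · have hnil : t.filter (fun x => decide (levenshtein_distance barcode x = levenshtein_distance barcode v)) = [] := by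
            rw [List.filter_eq_nil_iff]
            intro x hx
            have := hle x hx
            simp only [decide_eq_true_eq]
            omega
          simp [ha, hb, show min (levenshtein_distance barcode v) Mt = levenshtein_distance barcode v by omega,
            List.filter_cons, hnil]
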